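-- pv_equiv track=rewrite | github.com/schneiderl/M1Algo | src/algos/dynamic.py | retsoluce
-- ===== SOURCE A (Python) =====
-- def retsoluce(words, lines, n): # TODO rename
--     if lines[n] == 1:
--         line = []
--         for i in range(lines[n], n+1):
--             line.append(words[i-1])
--         return [line]
--
--     p = retsoluce(words, lines, lines[n]-1)
--     p.append([words[i-1] for i in range(lines[n], n+1)])
--     return p
-- ===== SOURCE B (Python) =====
-- def retsoluce(words, lines, n):
--     res = []
--     k = n
--     while True:
--         start = lines[k]
--         res.append([words[i - 1] for i in range(start, k + 1)])
--         if start == 1: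
--             break
--         k = start - 1
--     res.reverse()
--     return res
-- ===== Notes on version B (the rewrite author's own statement) =====
-- stated objective: alternative
-- what changed: Replaces A's recursion over the breakpoint table with an iterative backward walk that appends each line to an accumulator and reverses once at the end.
import Mathlib
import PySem

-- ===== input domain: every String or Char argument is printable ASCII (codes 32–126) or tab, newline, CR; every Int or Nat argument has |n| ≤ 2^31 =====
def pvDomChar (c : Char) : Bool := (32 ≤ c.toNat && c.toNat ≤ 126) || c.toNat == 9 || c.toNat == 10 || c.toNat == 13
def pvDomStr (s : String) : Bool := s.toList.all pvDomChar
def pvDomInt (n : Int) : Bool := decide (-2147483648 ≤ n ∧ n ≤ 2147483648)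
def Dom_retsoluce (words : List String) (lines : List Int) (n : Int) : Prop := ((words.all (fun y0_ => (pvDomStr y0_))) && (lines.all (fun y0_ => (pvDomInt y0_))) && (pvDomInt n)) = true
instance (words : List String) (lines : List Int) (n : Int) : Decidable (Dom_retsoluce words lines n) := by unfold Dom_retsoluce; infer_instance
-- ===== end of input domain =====

-- B replaces A's recursion with an iterative backward walk over the breakpoint table,
-- accumulating the lines and reversing once at the end (same value; no speed claim).

-- words[i-1]; under Pre_ every access is in range, so the default is never used
def pvWordAt (words : List String) (i : Int) : String :=
  (PySem.List.pyGet? words (i - 1)).getD ""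

-- ===== PORT A =====
-- A's recursion 'retsoluce(words, lines, lines[n]-1)' is not structural, so the port
-- carries a fuel guard; fuel 2*lines.length+2 exceeds the length of any terminating
-- breakpoint chain (a longer chain revisits an index and never terminates), so under
-- Pre_ the guard never fires and each step is A's code verbatim.
def retsoluceA (words : List String) (lines : List Int) : Nat → Int → List (List String)
  | 0, _ => []
  | fuel + 1, n =>
    match PySem.List.pyGet? lines n with
    | none => []
    | some s =>
      if s == 1 then
        -- line = []; for i in range(lines[n], n+1): line.append(words[i-1]); return [line]
        [List.foldl (fun acc i => acc ++ [pvWordAt words i]) [] (PySem.List.pyRange s (n + 1) 1)]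
      else
        -- p = retsoluce(words, lines, lines[n]-1); p.append([...]); return p
        retsoluceA words lines fuel (s - 1) ++
          [(PySem.List.pyRange s (n + 1) 1).map (pvWordAt words)]

def retsoluce (words : List String) (lines : List Int) (n : Int) : List (List String) :=
  retsoluceA words lines (2 * lines.length + 2) n

-- ===== PORT B =====
-- B's 'while True' loop, with the same fuel guard; acc is Python's res (append = ++ [line]),
-- reversed once on exit.
def retsoluceB (words : List String) (lines : List Int) :
    Nat → Int → List (List String) → List (List String)
  | 0, _, acc => acc.reverse
  | fuel + 1, k, acc =>
    match PySem.List.pyGet? lines k with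
    | none => acc.reverse
    | some start =>
      let acc' := acc ++ [(PySem.List.pyRange start (k + 1) 1).map (pvWordAt words)]
      if start == 1 then acc'.reverse
      else retsoluceB words lines fuel (start - 1) acc'

def retsoluce_alt (words : List String) (lines : List Int) (n : Int) : List (List String) :=
  retsoluceB words lines (2 * lines.length + 2) n []

-- ===== PRECONDITION & SPEC =====
-- Pre_ = exactly the inputs on which Python A returns: walking k → lines[k]-1 from n, every
-- lines[k] and every words[i-1] (i in range(lines[k], k+1)) access is in range and the walk
-- reaches a cell equal to 1.  The visited cells are the orbit of n, so the well-formedness of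
-- the table along them is stated as this bounded walk (2*lines.length+2 steps decide it
-- exactly: a longer chain repeats an index and A recurses forever).
def pvChainOk (words : List String) (lines : List Int) : Nat → Int → Bool
  | 0, _ => false
  | fuel + 1, k =>
    match PySem.List.pyGet? lines k with
    | none => false
    | some s =>
      ((PySem.List.pyRange s (k + 1) 1).all fun i => (PySem.List.pyGet? words (i - 1)).isSome)
        && (if s == 1 then true else pvChainOk words lines fuel (s - 1))

def Pre_retsoluce (words : List String) (lines : List Int) (n : Int) : Prop :=
  pvChainOk words lines (2 * lines.length + 2) n = true

instance (words : List String) (lines : List Int) (n : Int) : Decidable (Pre_retsoluce words lines n) := by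
  unfold Pre_retsoluce; infer_instance

def pvWitness_retsoluce : List String × List Int × Int := (["a", "b", "c"], [0, 1, 1, 2], 3)

def Spec_retsoluce (words : List String) (lines : List Int) (n : Int) (out : List (List String)) : Prop := out = retsoluce_alt words lines n
instance (words : List String) (lines : List Int) (n : Int) (out : List (List String)) : Decidable (Spec_retsoluce words lines n out) := by unfold Spec_retsoluce; infer_instance

-- ===== CLAIM (what is proved, stated in full; the proofs are below) =====
def Claim_equal_retsoluce : Prop := ∀ (words : List String) (lines : List Int) (n : Int), Dom_retsoluce words lines n → Pre_retsoluce words lines n → Spec_retsoluce words lines n (retsoluce words lines n)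

-- ===== LEMMAS AND PROOFS =====

-- A's append loop builds the same line as B's comprehension
theorem foldl_append_singleton {α β : Type} (f : α → β) :
    ∀ (xs : List α) (l : List β),
      List.foldl (fun acc i => acc ++ [f i]) l xs = l ++ xs.map f := by
  intro xs
  induction xs with
  | nil => intro l; simp
  | cons x xs ih => intro l; simp [List.foldl, ih]

-- loop invariant: B with accumulator acc computes A's result followed by acc reversed
theorem retsoluceB_eq (words : List String) (lines : List Int) :
    ∀ (fuel : Nat) (k : Int) (acc : List (List String)),
      retsoluceB words lines fuel k acc = retsoluceA words lines fuel k ++ acc.reverse := by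
  intro fuel
  induction fuel with
  | zero => intro k acc; simp [retsoluceB, retsoluceA]
  | succ fuel ih =>
    intro k acc
    rw [retsoluceB, retsoluceA]
    cases h : PySem.List.pyGet? lines k with
    | none => simp
    | some s =>
      by_cases hs : s == 1
      · simp only [hs, if_true, foldl_append_singleton]
        simp
      · simp only [hs, Bool.false_eq_true, if_false, ih]
        simp

-- ===== VERDICT (by name: the statement is the Claim_ definition above) =====
theorem retsoluce_spec : Claim_equal_retsoluce := by
  intro words lines n _hdom _hpre
  show retsoluce words lines n = retsoluce_alt words lines n
  unfold retsoluce retsoluce_alt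
  rw [retsoluceB_eq]
  simp
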